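-- pv_equiv track=rewrite | github.com/Guatemaltecho/tomorrow-is-Today | recursive/string_to_ord_value.py | string_to_ord_value_list
-- ===== SOURCE A (Python) =====
-- def string_to_ord_value_list(s):
--     """
--     take function that takes in a string and returns a list of ordinal values of the letters
--     so if string is abc output should be my_list = [97,98,99]
--     use function ord()
--
--     """
--     if len(s) == 1:
--         ord_value = ord(s[0])
--         res = [ord_value]
--         return res
--
--     part_1 = string_to_ord_value_list(s[:1])
--     part_2 = string_to_ord_value_list(s[1:])
--
--     res = part_1 + part_2
--     return res
-- ===== SOURCE B (Python) =====
-- def string_to_ord_value_list(s):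
--     if len(s) == 1:
--         return [ord(s[0])]
--     mid = len(s) // 2
--     return string_to_ord_value_list(s[:mid]) + string_to_ord_value_list(s[mid:])
-- ===== Notes on version B (the rewrite author's own statement) =====
-- stated objective: faster
-- what changed: Replaces A's head/tail linear recursion (peel one character, recurse on the rest, O(n) deep with O(n)-size slice copies per level) with a balanced divide-and-conquer that splits at the midpoint and recurses on both halves.
import Mathlib
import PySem

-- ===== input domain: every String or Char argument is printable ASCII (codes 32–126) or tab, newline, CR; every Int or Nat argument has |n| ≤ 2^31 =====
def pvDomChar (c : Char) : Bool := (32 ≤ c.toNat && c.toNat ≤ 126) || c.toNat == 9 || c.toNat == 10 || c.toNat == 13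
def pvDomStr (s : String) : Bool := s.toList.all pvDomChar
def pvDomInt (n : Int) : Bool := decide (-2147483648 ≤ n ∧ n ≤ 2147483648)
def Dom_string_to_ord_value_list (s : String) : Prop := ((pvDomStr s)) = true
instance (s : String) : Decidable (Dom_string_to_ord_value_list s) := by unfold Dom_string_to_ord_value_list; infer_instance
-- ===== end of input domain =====

-- B replaces A's head/tail linear recursion with a balanced midpoint divide-and-conquer (alternative decomposition, same results).


-- ===== PORT A =====
-- A's recursion over the characters: len == 1 is the base; otherwise recurse on s[:1]
-- and s[1:] and concatenate. Python A never returns on "" (infinite recursion); the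
-- [] case here is unreachable under Pre_ and is never hit by A's own recursive calls.
def goA_string_to_ord : List Char → List Int
  | [] => []
  | [c] => [(c.toNat : Int)]
  | c :: d :: rest =>
      goA_string_to_ord [c] ++ goA_string_to_ord (d :: rest)

def string_to_ord_value_list (s : String) : List Int := goA_string_to_ord s.toList

-- ===== PORT B =====
-- B's recursion: len == 1 base; otherwise split at mid = len // 2 and concatenate the
-- two recursive results. Python B never returns on "" either; [] is unreachable under Pre_.
def goB_string_to_ord : List Char → List Int
  | [] => []
  | [c] => [(c.toNat : Int)]
  | a :: b :: rest =>
      let mid := (a :: b :: rest).length / 2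
      goB_string_to_ord ((a :: b :: rest).take mid) ++ goB_string_to_ord ((a :: b :: rest).drop mid)
termination_by l => l.length
decreasing_by
  · simp only [List.length_take, List.length_cons]; omega
  · simp only [List.length_drop, List.length_cons]; omega

def string_to_ord_value_list_alt (s : String) : List Int := goB_string_to_ord s.toList

-- ===== PRECONDITION & SPEC =====
-- Pre_ excludes only the empty string, on which Python A (and B) hits a RecursionError.
def Pre_string_to_ord_value_list (s : String) : Prop := s ≠ ""
instance (s : String) : Decidable (Pre_string_to_ord_value_list s) := by unfold Pre_string_to_ord_value_list; infer_instance
def pvWitness_string_to_ord_value_list : String := "abc"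

def Spec_string_to_ord_value_list (s : String) (out : List Int) : Prop := out = string_to_ord_value_list_alt s
instance (s : String) (out : List Int) : Decidable (Spec_string_to_ord_value_list s out) := by unfold Spec_string_to_ord_value_list; infer_instance

-- ===== CLAIM (what is proved, stated in full; the proofs are below) =====
def Claim_equal_string_to_ord_value_list : Prop := ∀ (s : String), Dom_string_to_ord_value_list s → Pre_string_to_ord_value_list s → Spec_string_to_ord_value_list s (string_to_ord_value_list s)

-- ===== LEMMAS AND PROOFS =====

theorem goA_eq_map (l : List Char) : goA_string_to_ord l = l.map (fun c => (c.toNat : Int)) := by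
  induction l with
  | nil => simp [goA_string_to_ord]
  | cons c rest ih =>
    cases rest with
    | nil => simp [goA_string_to_ord]
    | cons d rest' =>
      rw [goA_string_to_ord, ih]
      simp [goA_string_to_ord]

theorem goB_eq_map (l : List Char) : goB_string_to_ord l = l.map (fun c => (c.toNat : Int)) := by
  induction l using goB_string_to_ord.induct with
  | case1 => simp [goB_string_to_ord]
  | case2 c => simp [goB_string_to_ord]
  | case3 a b rest mid ih1 ih2 =>
    rw [goB_string_to_ord, ih1, ih2, ← List.map_append, List.take_append_drop]

-- ===== VERDICT (by name: the statement is the Claim_ definition above) =====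
theorem string_to_ord_value_list_spec : Claim_equal_string_to_ord_value_list := by
  intro s _ _
  unfold Spec_string_to_ord_value_list string_to_ord_value_list string_to_ord_value_list_alt
  rw [goA_eq_map, goB_eq_map]
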